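-- pv_equiv track=rewrite | github.com/HAP-24-02/student-Attendance-System | verify_response.py | reorder_response
-- ===== SOURCE A (Python) =====
-- def reorder_response(response):
--     name = None
--     roll_number = None
--
--     for value in response:
--         if any(char.isdigit() for char in value):
--             roll_number = value
--         else:
--             name = value
--
--     return [name, roll_number]
-- ===== SOURCE B (Python) =====
-- def reorder_response(response):
--     roll_number = next((v for v in reversed(response) if any(c.isdigit() for c in v)), None)
--     name = next((v for v in reversed(response) if not any(c.isdigit() for c in v)), None)
--     return [name, roll_number]
-- ===== Notes on version B (the rewrite author's own statement) =====
-- stated objective: alternative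
-- what changed: Replaces the single classifying loop with two mutable slots by two independent reverse scans: the last digit-containing element and the last digit-free element are found directly with next over reversed(response).
import Mathlib
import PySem

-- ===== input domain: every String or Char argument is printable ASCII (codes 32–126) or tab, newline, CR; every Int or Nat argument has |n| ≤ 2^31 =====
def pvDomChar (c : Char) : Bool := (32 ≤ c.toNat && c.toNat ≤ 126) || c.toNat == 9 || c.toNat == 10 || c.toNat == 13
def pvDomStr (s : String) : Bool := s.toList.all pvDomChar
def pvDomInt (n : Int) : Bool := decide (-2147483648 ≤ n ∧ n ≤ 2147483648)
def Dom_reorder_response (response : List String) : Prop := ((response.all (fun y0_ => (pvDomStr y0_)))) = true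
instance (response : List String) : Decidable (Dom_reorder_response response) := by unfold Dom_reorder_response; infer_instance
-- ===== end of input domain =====

-- B replaces A's single classifying loop by two independent reverse-scan lookups; same cost, different decomposition.

-- any(char.isdigit() for char in value): exact on the printable-ASCII domain, where Python's isdigit is '0'..'9'
def pvHasDigit (v : String) : Bool := v.toList.any Char.isDigit

-- ===== PORT A =====
def reorder_response (response : List String) : List (Option String) :=
  let st := response.foldl
    (fun (st : Option String × Option String) value =>
      if pvHasDigit value then (st.1, some value) else (some value, st.2))
    (none, none)
  [st.1, st.2]

-- ===== PORT B =====
def reorder_response_alt (response : List String) : List (Option String) :=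
  let roll_number := response.reverse.find? (fun v => pvHasDigit v)
  let name := response.reverse.find? (fun v => !pvHasDigit v)
  [name, roll_number]

-- ===== PRECONDITION & SPEC =====
def Spec_reorder_response (response : List String) (out : List (Option String)) : Prop := out = reorder_response_alt response
instance (response : List String) (out : List (Option String)) : Decidable (Spec_reorder_response response out) := by unfold Spec_reorder_response; infer_instance

-- ===== CLAIM (what is proved, stated in full; the proofs are below) =====
def Claim_equal_reorder_response : Prop := ∀ (response : List String), Dom_reorder_response response → Spec_reorder_response response (reorder_response response)

-- ===== LEMMAS AND PROOFS =====
-- Loop invariant: A's fold from any start state equals the reverse-scan lookups, falling back to the start state.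
theorem pv_fold_eq (l : List String) (st : Option String × Option String) :
    l.foldl
      (fun (st : Option String × Option String) value =>
        if pvHasDigit value then (st.1, some value) else (some value, st.2)) st
    = ((l.reverse.find? (fun v => !pvHasDigit v)).or st.1,
       (l.reverse.find? (fun v => pvHasDigit v)).or st.2) := by
  induction l generalizing st with
  | nil => simp
  | cons x xs ih =>
    simp only [List.foldl_cons, ih, List.reverse_cons, List.find?_append]
    by_cases h : pvHasDigit x <;> simp [h]

-- ===== VERDICT (by name: the statement is the Claim_ definition above) =====
theorem reorder_response_spec : Claim_equal_reorder_response := by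
  intro response _
  unfold Spec_reorder_response reorder_response reorder_response_alt
  simp [pv_fold_eq]
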